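-- pv_equiv track=rewrite | github.com/IgorBekerskyy/algorithm_lab3 | clans_solution.py | solution
-- ===== SOURCE A (Python) =====
-- def general_amount(clan):
--     girls = 0
--     for clan_member in clan:
--         if clan_member % 2 == 0:
--             girls += 1
--     boys = len(clan) - girls
--     return girls, boys
--
-- def solution(clans):
--     boys_in_one_clan = [general_amount(clan)[1] for clan in clans]
--     girls_in_one_clan = [general_amount(clan)[0] for clan in clans]
--     boys = 0
--     girls = 0
--     sum = 0
--     for boy in boys_in_one_clan:
--         boys += boy
--     for girl in girls_in_one_clan:
--         girls += girl
--     for clan in clans: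
--         sum += general_amount(clan)[0] * general_amount(clan)[1]
--     return boys * girls - sum
-- ===== SOURCE B (Python) =====
-- def solution(clans):
--     boys_so_far = 0
--     girls_so_far = 0
--     total = 0
--     for clan in clans:
--         girls = sum(1 for m in clan if m % 2 == 0)
--         boys = len(clan) - girls
--         total += girls * boys_so_far + boys * girls_so_far
--         boys_so_far += boys
--         girls_so_far += girls
--     return total
-- ===== Notes on version B (the rewrite author's own statement) =====
-- stated objective: faster
-- what changed: B makes a single pass over the clans, counting each clan's cross pairs against running boys/girls accumulators, instead of A's three separate sum loops plus re-calling the per-clan counter three times per clan for the global-product-minus-intra-products formula.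
import Mathlib
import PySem

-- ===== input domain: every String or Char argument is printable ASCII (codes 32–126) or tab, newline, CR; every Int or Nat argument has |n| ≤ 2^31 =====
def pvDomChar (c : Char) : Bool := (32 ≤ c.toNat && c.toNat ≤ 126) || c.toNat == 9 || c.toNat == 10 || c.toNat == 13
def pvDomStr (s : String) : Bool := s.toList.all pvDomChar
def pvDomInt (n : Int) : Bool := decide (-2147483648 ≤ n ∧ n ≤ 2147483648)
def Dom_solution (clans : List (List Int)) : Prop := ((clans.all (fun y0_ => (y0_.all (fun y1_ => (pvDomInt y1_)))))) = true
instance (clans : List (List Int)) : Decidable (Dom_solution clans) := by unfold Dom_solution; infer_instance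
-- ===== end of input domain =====

-- B replaces A's global-product-minus-intra-products computation (with five passes over every
-- clan) by a single incremental pass keeping running boys/girls accumulators; same exact value.


-- ===== PORT A =====
-- general_amount(clan): count girls (evens) by a loop, boys = len - girls
def general_amount (clan : List Int) : Int × Int :=
  let girls := clan.foldl (fun g m => if PySem.Int.mod m 2 = 0 then g + 1 else g) 0
  let boys := (clan.length : Int) - girls
  (girls, boys)

def solution (clans : List (List Int)) : Int :=
  let boys_in_one_clan := clans.map (fun clan => (general_amount clan).2)
  let girls_in_one_clan := clans.map (fun clan => (general_amount clan).1)
  let boys := boys_in_one_clan.foldl (fun b x => b + x) 0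
  let girls := girls_in_one_clan.foldl (fun g x => g + x) 0
  let s := clans.foldl (fun s clan => s + (general_amount clan).1 * (general_amount clan).2) 0
  boys * girls - s

-- ===== PORT B =====
-- single pass: state (boys_so_far, girls_so_far, total)
def solution_alt (clans : List (List Int)) : Int :=
  (clans.foldl
    (fun st clan =>
      let girls := ((clan.filter (fun m => PySem.Int.mod m 2 = 0)).length : Int)
      let boys := (clan.length : Int) - girls
      (st.1 + boys, st.2.1 + girls, st.2.2 + girls * st.1 + boys * st.2.1))
    (0, 0, 0)).2.2

-- ===== PRECONDITION & SPEC =====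
def Spec_solution (clans : List (List Int)) (out : Int) : Prop := out = solution_alt clans
instance (clans : List (List Int)) (out : Int) : Decidable (Spec_solution clans out) := by unfold Spec_solution; infer_instance

-- ===== CLAIM (what is proved, stated in full; the proofs are below) =====
def Claim_equal_solution : Prop := ∀ (clans : List (List Int)), Dom_solution clans → Spec_solution clans (solution clans)

-- ===== LEMMAS AND PROOFS =====

-- per-clan girls count: A's counting loop = B's filter length (for any decidable predicate)
theorem count_foldl_eq (p : Int → Prop) [DecidablePred p] (clan : List Int) : ∀ (g : Int),
    clan.foldl (fun g m => if p m then g + 1 else g) g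
      = g + ((clan.filter (fun m => decide (p m))).length : Int) := by
  induction clan with
  | nil => intro g; simp
  | cons x xs ih =>
    intro g
    by_cases hx : p x
    · simp only [List.foldl_cons, List.filter_cons, if_pos hx, decide_eq_true hx, ih]
      push_cast [List.length_cons]
      ring
    · simp only [List.foldl_cons, List.filter_cons, if_neg hx, decide_eq_false hx, ih,
        Bool.false_eq_true, if_false]

def gcnt (clan : List Int) : Int := (general_amount clan).1
def bcnt (clan : List Int) : Int := (general_amount clan).2

def Gsum (clans : List (List Int)) : Int := (clans.map gcnt).sum
def Bsum (clans : List (List Int)) : Int := (clans.map bcnt).sum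
def Isum (clans : List (List Int)) : Int := (clans.map (fun c => gcnt c * bcnt c)).sum

theorem foldl_add_sum (l : List Int) : ∀ (a : Int),
    l.foldl (fun b x => b + x) a = a + l.sum := by
  induction l with
  | nil => intro a; simp
  | cons x xs ih => intro a; simp only [List.foldl_cons, ih, List.sum_cons]; ring

theorem foldl_intra_sum (clans : List (List Int)) : ∀ (a : Int),
    clans.foldl (fun s clan => s + (general_amount clan).1 * (general_amount clan).2) a
      = a + Isum clans := by
  induction clans with
  | nil => intro a; simp [Isum]
  | cons c cs ih =>
    intro a
    simp only [List.foldl_cons, ih, Isum, List.map_cons, List.sum_cons, gcnt, bcnt]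
    ring

theorem solution_closed (clans : List (List Int)) :
    solution clans = Bsum clans * Gsum clans - Isum clans := by
  simp only [solution, foldl_add_sum, foldl_intra_sum, zero_add]
  rfl

theorem gcnt_eq (c : List Int) :
    ((c.filter (fun m => decide (PySem.Int.mod m 2 = 0))).length : Int) = gcnt c := by
  simp only [gcnt, general_amount, count_foldl_eq (fun m => PySem.Int.mod m 2 = 0) c 0, zero_add]

theorem alt_go (clans : List (List Int)) :
    ∀ (bs gs t : Int),
      (clans.foldl
        (fun st clan =>
          let girls := ((clan.filter (fun m => PySem.Int.mod m 2 = 0)).length : Int)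
          let boys := (clan.length : Int) - girls
          (st.1 + boys, st.2.1 + girls, st.2.2 + girls * st.1 + boys * st.2.1))
        (bs, gs, t)).2.2
      = t + bs * Gsum clans + gs * Bsum clans + (Bsum clans * Gsum clans - Isum clans) := by
  induction clans with
  | nil => intro bs gs t; simp [Gsum, Bsum, Isum]
  | cons c cs ih =>
    intro bs gs t
    simp only [List.foldl_cons]
    rw [ih]
    have hb : (c.length : Int) - gcnt c = bcnt c := by
      simp only [bcnt, gcnt, general_amount]
    simp only [gcnt_eq, hb, Gsum, Bsum, Isum, List.map_cons, List.sum_cons]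
    ring

-- ===== VERDICT (by name: the statement is the Claim_ definition above) =====
theorem solution_spec : Claim_equal_solution := by
  intro clans _
  unfold Spec_solution
  rw [solution_closed]
  unfold solution_alt
  rw [alt_go]
  ring
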